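-- pv_equiv track=rewrite | github.com/Herrieson/nanoclaw | docker/hermes-runner/adapter/run_task.py | redact_command
-- ===== SOURCE A (Python) =====
-- def redact_command(command: str, args: list[str]) -> list[str]:
--     redacted = [command]
--     redact_next = False
--     for arg in args:
--         if redact_next:
--             redacted.append("<task prompt>")
--             redact_next = False
--             continue
--         redacted.append(arg)
--         if arg in {"-z", "-q", "--query"}:
--             redact_next = True
--     return redacted
-- ===== SOURCE B (Python) =====
-- _FLAGS = frozenset({"-z", "-q", "--query"})
--
-- def redact_command(command: str, args: list[str]) -> list[str]:
--     # Closed-form: args[i] is redacted iff the run of consecutive flag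
--     # arguments immediately before index i has odd length.
--     runs = []            # runs[i] = length of flag-run ending just before i
--     run = 0
--     for a in args:
--         runs.append(run)
--         run = run + 1 if a in _FLAGS else 0
--     return [command] + ["<task prompt>" if r % 2 == 1 else a
--                         for a, r in zip(args, runs)]
-- ===== Notes on version B (the rewrite author's own statement) =====
-- stated objective: alternative
-- what changed: Replaced A's stateful pass carrying a redact_next boolean by a closed-form characterization: an argument is redacted iff the run of consecutive flag arguments immediately preceding it has odd length; B computes the flag-run-length array in one stage and then builds the output by a parity map over zip(args, runs).
import Mathlib
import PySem

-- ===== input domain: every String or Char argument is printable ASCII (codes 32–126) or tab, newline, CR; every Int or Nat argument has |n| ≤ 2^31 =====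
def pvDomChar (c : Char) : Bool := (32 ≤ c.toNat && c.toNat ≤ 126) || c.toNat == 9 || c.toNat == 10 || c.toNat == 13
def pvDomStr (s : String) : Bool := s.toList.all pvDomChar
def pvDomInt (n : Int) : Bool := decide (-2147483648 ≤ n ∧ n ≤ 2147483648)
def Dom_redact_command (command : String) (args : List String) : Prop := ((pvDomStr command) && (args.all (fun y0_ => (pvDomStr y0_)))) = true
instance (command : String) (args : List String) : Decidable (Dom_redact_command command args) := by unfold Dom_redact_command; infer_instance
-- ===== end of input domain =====

-- B replaces A's carried redact_next boolean with a closed form: an argument is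
-- redacted iff the flag-run immediately preceding it has odd length (alternative
-- decomposition, same cost).

-- ===== PORT A =====
-- A's loop: state = (accumulated list, redact_next flag), one arg per step.
def redact_command_loop : List String → List String → Bool → List String
  | [], acc, _ => acc
  | a :: rest, acc, rn =>
    if rn then redact_command_loop rest (acc ++ ["<task prompt>"]) false
    else redact_command_loop rest (acc ++ [a])
      (a == "-z" || a == "-q" || a == "--query")

def redact_command (command : String) (args : List String) : List String :=
  redact_command_loop args [command] false

-- ===== PORT B =====
def pvIsFlag (a : String) : Bool := a == "-z" || a == "-q" || a == "--query"

-- B: stage 1 builds runs[i] = length of the flag-run ending just before index i;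
-- stage 2 maps zip(args, runs), redacting exactly the odd-run positions.
def redact_command_alt (command : String) (args : List String) : List String :=
  let p := args.foldl
    (fun (p : Nat × List Nat) a =>
      (if pvIsFlag a then p.1 + 1 else 0, p.2 ++ [p.1])) (0, [])
  command ::
    (args.zip p.2).map (fun ar => if ar.2 % 2 == 1 then "<task prompt>" else ar.1)

-- ===== PRECONDITION & SPEC =====
def Spec_redact_command (command : String) (args : List String) (out : List String) : Prop := out = redact_command_alt command args
instance (command : String) (args : List String) (out : List String) : Decidable (Spec_redact_command command args out) := by unfold Spec_redact_command; infer_instance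

-- ===== CLAIM (what is proved, stated in full; the proofs are below) =====
def Claim_equal_redact_command : Prop := ∀ (command : String) (args : List String), Dom_redact_command command args → Spec_redact_command command args (redact_command command args)

-- ===== LEMMAS AND PROOFS =====
-- Recursive view of B's runs array, starting from current run length k.
def pvRunsFrom : Nat → List String → List Nat
  | _, [] => []
  | k, a :: rest => k :: pvRunsFrom (if pvIsFlag a then k + 1 else 0) rest

theorem foldl_runs (args : List String) :
    ∀ k rs, (args.foldl
      (fun (p : Nat × List Nat) a =>
        (if pvIsFlag a then p.1 + 1 else 0, p.2 ++ [p.1])) (k, rs)).2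
      = rs ++ pvRunsFrom k args := by
  induction args with
  | nil => intro k rs; simp [pvRunsFrom]
  | cons a rest ih =>
    intro k rs
    simp only [List.foldl_cons, pvRunsFrom, ih]
    simp

theorem loop_eq_parity (args : List String) :
    ∀ k acc, redact_command_loop args acc (k % 2 == 1)
      = acc ++ (args.zip (pvRunsFrom k args)).map
          (fun ar => if ar.2 % 2 == 1 then "<task prompt>" else ar.1) := by
  induction args with
  | nil => intro k acc; simp [redact_command_loop, pvRunsFrom]
  | cons a rest ih =>
    intro k acc
    by_cases hk : k % 2 = 1
    · have h1 : (k % 2 == 1) = true := by simp [hk]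
      have hnext : ((if pvIsFlag a then k + 1 else 0) % 2 == 1) = false := by
        by_cases hf : pvIsFlag a = true <;> simp [hf] <;> omega
      rw [redact_command_loop, h1]
      simp only [if_true]
      rw [show (false = ((if pvIsFlag a then k + 1 else 0) % 2 == 1)) from hnext.symm,
          ih]
      simp [pvRunsFrom, hk]
    · have h1 : (k % 2 == 1) = false := by simp [hk]
      have hnext : (a == "-z" || a == "-q" || a == "--query")
          = ((if pvIsFlag a then k + 1 else 0) % 2 == 1) := by
        show pvIsFlag a = _
        by_cases hf : pvIsFlag a = true <;> simp [hf] <;> omega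
      rw [redact_command_loop, h1]
      simp only [if_false, Bool.false_eq_true]
      rw [hnext, ih]
      simp [pvRunsFrom, hk]

-- ===== VERDICT (by name: the statement is the Claim_ definition above) =====
theorem redact_command_spec : Claim_equal_redact_command := by
  intro command args _
  show redact_command command args = redact_command_alt command args
  have h0 : (false : Bool) = ((0 : Nat) % 2 == 1) := by decide
  simp only [redact_command, redact_command_alt, foldl_runs, List.nil_append]
  rw [h0, loop_eq_parity]
  simp
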